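-- pv_equiv track=rewrite | github.com/BIOM421/hw1-github-and-python-basics-A-guacate | hello.py | hello_world_n
-- ===== SOURCE A (Python) =====
-- def hello_world_n(N):
--     result = ""
--     for _ in range(N):
--         if _ < N - 1:
--             result += "Hello World! "
--         else:
--             result += "Hello World!"
--     return result
-- ===== SOURCE B (Python) =====
-- def hello_world_n(N):
--     return " ".join(["Hello World!"] * N)
-- ===== Notes on version B (the rewrite author's own statement) =====
-- stated objective: idiomatic
-- what changed: Replaces the index loop with its per-iteration last-element branch and string accumulation by a single space-join of a replicated list, with no loop and no branch.
import Mathlib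
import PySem

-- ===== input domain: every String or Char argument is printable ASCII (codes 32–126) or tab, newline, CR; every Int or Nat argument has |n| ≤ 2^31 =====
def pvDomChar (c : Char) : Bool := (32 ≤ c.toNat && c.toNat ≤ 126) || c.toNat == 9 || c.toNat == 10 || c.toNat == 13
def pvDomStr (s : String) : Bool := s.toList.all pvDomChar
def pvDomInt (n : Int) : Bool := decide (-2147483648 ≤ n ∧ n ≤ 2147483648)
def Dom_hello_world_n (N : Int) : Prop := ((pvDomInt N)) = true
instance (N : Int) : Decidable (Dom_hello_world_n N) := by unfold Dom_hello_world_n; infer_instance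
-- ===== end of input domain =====

-- B replaces A's index loop (branching on the last index) by a space-join of a replicated list; objective: idiomatic.

-- ===== PORT A =====
-- result accumulated as List Char (Lean's String.append is opaque to the kernel; concatenation on code points is exact)
def hello_world_n (N : Int) : String :=
  String.ofList ((PySem.List.pyRange 0 N 1).foldl
    (fun result i =>
      if i < N - 1 then result ++ "Hello World! ".toList
      else result ++ "Hello World!".toList) [])

-- ===== PORT B =====
-- " ".join(["Hello World!"] * N); list repetition with a non-positive count is the empty list
def hello_world_n_alt (N : Int) : String :=
  PySem.Str.join " " (List.replicate N.toNat "Hello World!")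

-- ===== PRECONDITION & SPEC =====
def Spec_hello_world_n (N : Int) (out : String) : Prop := out = hello_world_n_alt N
instance (N : Int) (out : String) : Decidable (Spec_hello_world_n N out) := by unfold Spec_hello_world_n; infer_instance

-- ===== CLAIM (what is proved, stated in full; the proofs are below) =====
def Claim_equal_hello_world_n : Prop := ∀ (N : Int), Dom_hello_world_n N → Spec_hello_world_n N (hello_world_n N)

-- ===== LEMMAS AND PROOFS =====

-- the loop from index a on appends exactly the join of the remaining (N - a) copies
theorem hw_loop (N : Int) : ∀ (k : Nat) (a : Int) (acc : List Char), a + k = N →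
    (PySem.List.pyRange a N 1).foldl
      (fun result i =>
        if i < N - 1 then result ++ "Hello World! ".toList
        else result ++ "Hello World!".toList) acc
    = acc ++ PySem.Chars.join [' '] (List.replicate k "Hello World!".toList) := by
  intro k
  induction k with
  | zero =>
    intro a acc h
    rw [PySem.List.pyRange_one_eq_nil (by omega)]
    simp [PySem.Chars.join_nil]
  | succ k ih =>
    intro a acc h
    rw [PySem.List.pyRange_one_cons (by omega)]
    simp only [List.foldl_cons]
    cases k with
    | zero =>
      rw [if_neg (by omega), PySem.List.pyRange_one_eq_nil (by omega)]
      simp [PySem.Chars.join_singleton]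
    | succ m =>
      rw [if_pos (by omega), ih (a + 1) _ (by omega)]
      conv_rhs => rw [List.replicate_succ, List.replicate_succ, PySem.Chars.join_cons_cons]
      have hsp : "Hello World! ".toList = "Hello World!".toList ++ [' '] := by decide
      rw [hsp]
      simp [List.replicate_succ]

theorem hello_world_n_eq (N : Int) : hello_world_n N = hello_world_n_alt N := by
  unfold hello_world_n hello_world_n_alt
  apply String.ext
  rw [PySem.Str.toList_join, List.map_replicate]
  by_cases h : N ≤ 0
  · rw [PySem.List.pyRange_one_eq_nil h, Int.toNat_of_nonpos h]
    simp [PySem.Chars.join_nil]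
  · rw [hw_loop N N.toNat 0 [] (by omega)]
    simp

-- ===== VERDICT (by name: the statement is the Claim_ definition above) =====
theorem hello_world_n_spec : Claim_equal_hello_world_n := by
  intro N _
  exact hello_world_n_eq N
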